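-- pv_equiv track=rewrite | github.com/zq-zhan/Algorithm_updating | 202503贪心算法/20250323基本贪心策略/1-12摧毁小行星.py | asteroidsDestroyed
-- ===== SOURCE A (Python) =====
-- def asteroidsDestroyed(mass, asteroids):
-- 	# n = len(asteroids)
-- 	asteroids.sort()
-- 	for x in asteroids:
-- 		if mass >= x:
-- 			mass += x
-- 		else:
-- 			return False
-- 	return True
-- ===== SOURCE B (Python) =====
-- def asteroidsDestroyed(mass, asteroids):
--     # Backward pass: compute the minimal starting mass needed to clear the
--     # sorted sequence (None = no constraint), then compare once.
--     asteroids.sort()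
--     need = None
--     for x in reversed(asteroids):
--         need = x if need is None else max(x, need - x)
--     return need is None or mass >= need
-- ===== Notes on version B (the rewrite author's own statement) =====
-- stated objective: alternative
-- what changed: Instead of simulating the forward greedy absorption with early return, B computes by a backward pass over the sorted list the minimal starting mass required (need = max(x, need - x)) and returns a single comparison mass >= need.
import Mathlib
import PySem

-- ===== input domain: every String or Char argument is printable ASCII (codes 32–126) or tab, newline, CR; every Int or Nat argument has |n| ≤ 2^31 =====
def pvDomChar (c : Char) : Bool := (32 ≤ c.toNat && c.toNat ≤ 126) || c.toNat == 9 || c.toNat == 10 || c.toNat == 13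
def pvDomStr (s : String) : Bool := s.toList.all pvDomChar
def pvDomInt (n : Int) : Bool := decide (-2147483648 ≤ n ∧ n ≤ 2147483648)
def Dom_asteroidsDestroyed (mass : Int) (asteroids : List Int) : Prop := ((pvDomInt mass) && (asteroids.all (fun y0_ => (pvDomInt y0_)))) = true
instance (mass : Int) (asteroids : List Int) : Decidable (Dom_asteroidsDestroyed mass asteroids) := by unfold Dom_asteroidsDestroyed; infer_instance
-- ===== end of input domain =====

-- B replaces the forward greedy simulation by a backward pass computing the minimal
-- starting mass required (alternative algorithm, same cost). Both A and B sort the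
-- argument in place; the equivalence proved here is about the RETURN value only.

-- ===== PORT A =====
-- the for-loop with early `return False`
def asteroidsDestroyedLoop (mass : Int) : List Int → Bool
  | [] => true
  | x :: xs => if mass ≥ x then asteroidsDestroyedLoop (mass + x) xs else false

def asteroidsDestroyed (mass : Int) (asteroids : List Int) : Bool :=
  asteroidsDestroyedLoop mass (PySem.List.sorted asteroids (fun a => a) false)

-- ===== PORT B =====
-- `need = x if need is None else max(x, need - x)`
def needStep (need : Option Int) (x : Int) : Option Int :=
  match need with
  | none => some x
  | some n => some (max x (n - x))

def asteroidsDestroyed_alt (mass : Int) (asteroids : List Int) : Bool :=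
  let s := PySem.List.sorted asteroids (fun a => a) false
  match (s.reverse).foldl needStep none with
  | none => true
  | some need => decide (mass ≥ need)

-- ===== PRECONDITION & SPEC =====
def Spec_asteroidsDestroyed (mass : Int) (asteroids : List Int) (out : Bool) : Prop := out = asteroidsDestroyed_alt mass asteroids
instance (mass : Int) (asteroids : List Int) (out : Bool) : Decidable (Spec_asteroidsDestroyed mass asteroids out) := by unfold Spec_asteroidsDestroyed; infer_instance

-- ===== CLAIM =====
def Claim_equal_asteroidsDestroyed : Prop := ∀ (mass : Int) (asteroids : List Int), Dom_asteroidsDestroyed mass asteroids → Spec_asteroidsDestroyed mass asteroids (asteroidsDestroyed mass asteroids)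

-- ===== LEMMAS AND PROOFS =====
-- the early-return loop equals the minimal-required-mass check, for ANY list
theorem loop_eq_need (l : List Int) : ∀ (mass : Int),
    asteroidsDestroyedLoop mass l =
      (match l.foldr (fun x acc => needStep acc x) none with
       | none => true
       | some need => decide (mass ≥ need)) := by
  induction l with
  | nil => intro mass; rfl
  | cons x xs ih =>
      intro mass
      simp only [asteroidsDestroyedLoop, List.foldr_cons, ih]
      rcases h : xs.foldr (fun x acc => needStep acc x) none with _ | N <;>
        simp only [needStep] <;> by_cases hx : mass ≥ x
      · simp [hx]
      · simp [hx]
      · simp only [hx, if_true, decide_eq_decide]; omega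
      · simp only [hx, if_false]
        rw [eq_comm, decide_eq_false_iff_not]
        omega

-- ===== VERDICT =====
theorem asteroidsDestroyed_spec : Claim_equal_asteroidsDestroyed := by
  intro mass asteroids _
  unfold Spec_asteroidsDestroyed asteroidsDestroyed asteroidsDestroyed_alt
  simp only [List.foldl_reverse]
  exact loop_eq_need _ mass
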